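-- pv_equiv track=rewrite | github.com/loomkoom/python-ess | O2_oefenzittingen/oefenzitting_11/O4_ascending_sequences.py | ascending_sequences
-- ===== SOURCE A (Python) =====
-- def ascending_sequences(n):
--     seq = [()]
--
--     for i in range(1, n + 1):   # O(n)
--         new_elms = []
--         for elem in seq:        # O(n)
--             new_elms.append(elem + (i,))    # O(1)
--         seq.extend(new_elms)    # O(len(new_elms))
--     return seq
-- ===== SOURCE B (Python) =====
-- def ascending_sequences(n):
--     if n <= 0:
--         return [()]
--     prev = ascending_sequences(n - 1)
--     return prev + [s + (n,) for s in prev]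
-- ===== Notes on version B (the rewrite author's own statement) =====
-- stated objective: alternative
-- what changed: Replaces the iterative in-place extend loop with a recursive power-set builder that computes the previous level once and appends n to each of its subsets.
import Mathlib
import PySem

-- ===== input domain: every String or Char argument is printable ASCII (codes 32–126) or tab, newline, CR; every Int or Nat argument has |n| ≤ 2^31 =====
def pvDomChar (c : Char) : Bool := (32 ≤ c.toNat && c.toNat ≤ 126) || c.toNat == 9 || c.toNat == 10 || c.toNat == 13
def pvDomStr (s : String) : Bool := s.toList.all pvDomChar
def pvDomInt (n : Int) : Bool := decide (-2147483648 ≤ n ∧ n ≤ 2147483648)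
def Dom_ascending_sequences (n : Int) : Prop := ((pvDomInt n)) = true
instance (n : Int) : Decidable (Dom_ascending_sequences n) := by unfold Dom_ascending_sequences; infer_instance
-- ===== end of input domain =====

-- B replaces A's iterative in-place extend loop by a recursive power-set builder; objective: alternative decomposition (same cost).

-- ===== PORT A =====
-- seq starts as [()]; for i in range(1, n+1): new_elms = [elem + (i,) for elem in seq]; seq.extend(new_elms)
def ascending_sequences (n : Int) : List (List Int) :=
  (PySem.List.pyRange 1 (n + 1) 1).foldl
    (fun seq i =>
      let new_elms := seq.foldl (fun acc elem => acc ++ [elem ++ [i]]) []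
      seq ++ new_elms)
    [[]]

-- ===== PORT B =====
-- recursion on n via the fuel n.toNat (n ≤ 0 is the base case, exactly as in Source B)
def ascending_sequences_alt_go : Nat → List (List Int)
  | 0 => [[]]
  | Nat.succ k =>
      let prev := ascending_sequences_alt_go k
      prev ++ prev.map (fun s => s ++ [((k : Int) + 1)])

def ascending_sequences_alt (n : Int) : List (List Int) :=
  ascending_sequences_alt_go n.toNat

-- ===== PRECONDITION & SPEC =====
def Spec_ascending_sequences (n : Int) (out : List (List Int)) : Prop := out = ascending_sequences_alt n
instance (n : Int) (out : List (List Int)) : Decidable (Spec_ascending_sequences n out) := by unfold Spec_ascending_sequences; infer_instance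

-- ===== CLAIM (what is proved, stated in full; the proofs are below) =====
def Claim_equal_ascending_sequences : Prop := ∀ (n : Int), Dom_ascending_sequences n → Spec_ascending_sequences n (ascending_sequences n)

-- ===== LEMMAS AND PROOFS =====

-- the fold over range(1, k+1) equals the recursion with fuel k
theorem pv_fold_eq_go (k : Nat) :
    (PySem.List.pyRange 1 ((k : Int) + 1) 1).foldl
      (fun seq i =>
        let new_elms := seq.foldl (fun acc elem => acc ++ [elem ++ [i]]) []
        seq ++ new_elms)
      [[]] = ascending_sequences_alt_go k := by
  induction k with
  | zero => simp [PySem.List.pyRange_one_eq_nil, ascending_sequences_alt_go]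
  | succ m ih =>
    have hsplit : PySem.List.pyRange 1 ((m : Int) + 1 + 1) 1 =
        PySem.List.pyRange 1 ((m : Int) + 1) 1 ++ [(m : Int) + 1] := by
      have := PySem.List.pyRange_one_succ_right (a := 1) (b := (m : Int) + 1) (by omega)
      simpa using this
    rw [show ((Nat.succ m : Nat) : Int) + 1 = (m : Int) + 1 + 1 by push_cast; ring, hsplit,
        List.foldl_append, ih]
    simp [ascending_sequences_alt_go]
    induction ascending_sequences_alt_go m with
    | nil => rfl
    | cons h t ih2 => simp_all

-- ===== VERDICT (by name: the statement is the Claim_ definition above) =====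
theorem ascending_sequences_spec : Claim_equal_ascending_sequences := by
  intro n _
  unfold Spec_ascending_sequences ascending_sequences ascending_sequences_alt
  by_cases hn : 0 ≤ n
  · have : n = (n.toNat : Int) := (Int.toNat_of_nonneg hn).symm
    rw [this]
    exact pv_fold_eq_go n.toNat
  · push Not at hn
    have h1 : PySem.List.pyRange 1 (n + 1) 1 = [] := PySem.List.pyRange_one_eq_nil (by omega)
    have h2 : n.toNat = 0 := by omega
    rw [h1, h2]
    rfl
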